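-- pv_equiv track=rewrite | github.com/miau-watermelon/miausort | miausort.py | exp_search_fw
-- ===== SOURCE A (Python) =====
-- def exp_search_fw(arr, target, start, end, right):
--     if (arr[start] > target if right else arr[start] >= target):
--         return start
--     i = 1
--     while start+i < end and (arr[start+i] <= target if right else arr[start+i] < target):
--         i *= 2
--     low = start+(i//2)
--     high = min(start+i, end)
--     while low < high:
--         mid = (low+high)//2
--         if (arr[mid] <= target if right else arr[mid] < target):
--             low = mid+1
--         else:
--             high = mid
--     return low
-- ===== SOURCE B (Python) =====
-- def exp_search_fw(arr, target, start, end, right):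
--     if (arr[start] > target if right else arr[start] >= target):
--         return start
--     low, high = start, end
--     while low < high:
--         mid = (low + high) // 2
--         if (arr[mid] <= target if right else arr[mid] < target):
--             low = mid + 1
--         else:
--             high = mid
--     return low
-- ===== Notes on version B (the rewrite author's own statement) =====
-- stated objective: simpler
-- what changed: B keeps A's first-element guard but replaces the exponential-doubling bracket phase plus bracketed binary search with one plain binary search over the whole half-open range [start, end).
-- outside the precondition, e.g. on exp_search_fw([1, 2, 3], 2, -2, 3, True): A returns -1, B returns 2; on exp_search_fw([-1, 2, 0, -4], 0, 0, 4, True): A returns 1, B returns 4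
import Mathlib
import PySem

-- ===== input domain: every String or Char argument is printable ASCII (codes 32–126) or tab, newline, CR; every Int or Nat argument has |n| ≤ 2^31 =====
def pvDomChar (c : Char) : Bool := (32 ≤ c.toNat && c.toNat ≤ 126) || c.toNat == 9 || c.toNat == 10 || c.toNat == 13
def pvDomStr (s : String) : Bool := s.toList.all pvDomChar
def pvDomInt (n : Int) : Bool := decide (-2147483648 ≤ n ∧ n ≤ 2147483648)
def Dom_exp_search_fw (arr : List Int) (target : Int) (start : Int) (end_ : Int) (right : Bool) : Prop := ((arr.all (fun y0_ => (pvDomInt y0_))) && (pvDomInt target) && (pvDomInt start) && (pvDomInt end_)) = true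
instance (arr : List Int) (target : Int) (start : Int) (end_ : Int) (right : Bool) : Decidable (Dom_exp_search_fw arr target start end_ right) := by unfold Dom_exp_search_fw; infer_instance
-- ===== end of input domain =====

-- B replaces A's exponential-doubling + bracketed binary search with one plain binary search
-- over [start, end): simpler, same boundary on sorted ranges (return value only; no mutation).


-- ===== PORT A =====
-- the side-dependent probe `arr[k] <= target if right else arr[k] < target`
-- (arr[k] ported with PySem.List.pyGetD; Pre_ keeps every probed index in range)
def pvProbe (arr : List Int) (target : Int) (right : Bool) (k : Int) : Bool :=
  if right then decide (PySem.List.pyGetD arr k 0 ≤ target)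
  else decide (PySem.List.pyGetD arr k 0 < target)

-- the doubling loop `while start+i < end and probe(start+i): i *= 2`
-- (fuel only makes the recursion structural; the callers pass enough for every iteration)
def pvExpLoop (arr : List Int) (target : Int) (start : Int) (end_ : Int) (right : Bool) :
    Nat → Int → Int
  | 0, i => i
  | fuel + 1, i =>
    if start + i < end_ ∧ pvProbe arr target right (start + i) = true then
      pvExpLoop arr target start end_ right fuel (i * 2)
    else i

-- the binary-search loop of A (runs on the bracket found by the doubling phase)
def pvBinLoopA (arr : List Int) (target : Int) (right : Bool) : Nat → Int → Int → Int
  | 0, low, _ => low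
  | fuel + 1, low, high =>
    if low < high then
      let mid := PySem.Int.floordiv (low + high) 2
      if pvProbe arr target right mid = true then
        pvBinLoopA arr target right fuel (mid + 1) high
      else
        pvBinLoopA arr target right fuel low mid
    else low

def exp_search_fw (arr : List Int) (target : Int) (start : Int) (end_ : Int) (right : Bool) : Int :=
  if (if right then PySem.List.pyGetD arr start 0 > target
      else PySem.List.pyGetD arr start 0 ≥ target) then start
  else
    let i := pvExpLoop arr target start end_ right ((end_ - (start + 1)).toNat + 1) 1
    let low := start + PySem.Int.floordiv i 2
    let high := min (start + i) end_
    pvBinLoopA arr target right (high - low).toNat low high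

-- ===== PORT B =====
-- B: A's first-element guard, then one plain binary search over the whole range [start, end)
def pvBisect (arr : List Int) (target : Int) (right : Bool) : Nat → Int → Int → Int
  | 0, low, _ => low
  | fuel + 1, low, high =>
    if low < high then
      let mid := PySem.Int.floordiv (low + high) 2
      if pvProbe arr target right mid = true then
        pvBisect arr target right fuel (mid + 1) high
      else
        pvBisect arr target right fuel low mid
    else low

def exp_search_fw_alt (arr : List Int) (target : Int) (start : Int) (end_ : Int) (right : Bool) : Int :=
  if (if right then PySem.List.pyGetD arr start 0 > target
      else PySem.List.pyGetD arr start 0 ≥ target) then start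
  else pvBisect arr target right (end_ - start).toNat start end_

-- ===== PRECONDITION & SPEC =====
-- Pre_ excludes inputs where A raises IndexError (start out of range, or end beyond the
-- list while start < end) and, unless the first-element guard already answers, non-empty
-- ranges with a negative start (A searches the wraparound slice, an artefact of Python
-- negative indexing) or with arr[start:end] not sorted ascending (there A's answer is an
-- accident of its power-of-two probe sequence, B's of its midpoints; the function is a
-- search in a sorted range).
def Pre_exp_search_fw (arr : List Int) (target : Int) (start : Int) (end_ : Int) (right : Bool) : Prop :=
  -(arr.length : Int) ≤ start ∧ start < (arr.length : Int) ∧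
  (start < end_ →
    (if right = true then PySem.List.pyGetD arr start 0 > target
     else PySem.List.pyGetD arr start 0 ≥ target) ∨
    (0 ≤ start ∧ end_ ≤ (arr.length : Int) ∧
      (PySem.List.slice arr (some start) (some end_)).Pairwise (· ≤ ·)))
instance (arr : List Int) (target : Int) (start : Int) (end_ : Int) (right : Bool) : Decidable (Pre_exp_search_fw arr target start end_ right) := by unfold Pre_exp_search_fw; infer_instance

def pvWitness_exp_search_fw : List Int × Int × Int × Int × Bool := ([1, 2, 3], 2, 0, 3, true)

def Spec_exp_search_fw (arr : List Int) (target : Int) (start : Int) (end_ : Int) (right : Bool) (out : Int) : Prop := out = exp_search_fw_alt arr target start end_ right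
instance (arr : List Int) (target : Int) (start : Int) (end_ : Int) (right : Bool) (out : Int) : Decidable (Spec_exp_search_fw arr target start end_ right out) := by unfold Spec_exp_search_fw; infer_instance

-- ===== CLAIM (what is proved, stated in full; the proofs are below) =====
def Claim_equal_exp_search_fw : Prop := ∀ (arr : List Int) (target : Int) (start : Int) (end_ : Int) (right : Bool), Dom_exp_search_fw arr target start end_ right → Pre_exp_search_fw arr target start end_ right → Spec_exp_search_fw arr target start end_ right (exp_search_fw arr target start end_ right)

-- ===== LEMMAS AND PROOFS =====

theorem pvMidBounds (low high : Int) (h : low < high) :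
    low ≤ PySem.Int.floordiv (low + high) 2 ∧ PySem.Int.floordiv (low + high) 2 < high := by
  have hm := PySem.Int.floordiv_eq_ediv_of_pos (a := low + high) (b := 2) (by omega)
  omega

-- a fueled binary-search loop returns the split point b of its bracket
theorem binA_char (arr : List Int) (target : Int) (right : Bool) :
    ∀ (fuel : Nat) (low high b : Int), (high - low).toNat ≤ fuel → low ≤ b → b ≤ high →
    (∀ k, low ≤ k → k < b → pvProbe arr target right k = true) →
    (∀ k, b ≤ k → k < high → pvProbe arr target right k = false) →
    pvBinLoopA arr target right fuel low high = b := by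
  intro fuel
  induction fuel with
  | zero =>
    intro low high b hf h1 h2 _ _
    simp only [pvBinLoopA]
    omega
  | succ n ih =>
    intro low high b hf h1 h2 hT hF
    simp only [pvBinLoopA]
    split_ifs with hlh hP
    · have hmid := pvMidBounds low high hlh
      have hb : PySem.Int.floordiv (low + high) 2 + 1 ≤ b := by
        by_contra hc
        have := hF (PySem.Int.floordiv (low + high) 2) (by omega) (by omega)
        rw [hP] at this
        exact absurd this (by simp)
      refine ih _ _ b ?_ hb h2 (fun k hk1 hk2 => hT k (by omega) hk2) hF
      have hm := PySem.Int.floordiv_eq_ediv_of_pos (a := low + high) (b := 2) (by omega)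
      omega
    · have hmid := pvMidBounds low high hlh
      have hb : b ≤ PySem.Int.floordiv (low + high) 2 := by
        by_contra hc
        have := hT (PySem.Int.floordiv (low + high) 2) (by omega) (by omega)
        rw [this] at hP
        exact absurd hP (by simp)
      refine ih _ _ b ?_ h1 hb hT (fun k hk1 hk2 => hF k hk1 (by omega))
      have hm := PySem.Int.floordiv_eq_ediv_of_pos (a := low + high) (b := 2) (by omega)
      omega
    · omega

theorem bisect_char (arr : List Int) (target : Int) (right : Bool) :
    ∀ (fuel : Nat) (low high b : Int), (high - low).toNat ≤ fuel → low ≤ b → b ≤ high →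
    (∀ k, low ≤ k → k < b → pvProbe arr target right k = true) →
    (∀ k, b ≤ k → k < high → pvProbe arr target right k = false) →
    pvBisect arr target right fuel low high = b := by
  intro fuel
  induction fuel with
  | zero =>
    intro low high b hf h1 h2 _ _
    simp only [pvBisect]
    omega
  | succ n ih =>
    intro low high b hf h1 h2 hT hF
    simp only [pvBisect]
    split_ifs with hlh hP
    · have hmid := pvMidBounds low high hlh
      have hb : PySem.Int.floordiv (low + high) 2 + 1 ≤ b := by
        by_contra hc
        have := hF (PySem.Int.floordiv (low + high) 2) (by omega) (by omega)
        rw [hP] at this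
        exact absurd this (by simp)
      refine ih _ _ b ?_ hb h2 (fun k hk1 hk2 => hT k (by omega) hk2) hF
      have hm := PySem.Int.floordiv_eq_ediv_of_pos (a := low + high) (b := 2) (by omega)
      omega
    · have hmid := pvMidBounds low high hlh
      have hb : b ≤ PySem.Int.floordiv (low + high) 2 := by
        by_contra hc
        have := hT (PySem.Int.floordiv (low + high) 2) (by omega) (by omega)
        rw [this] at hP
        exact absurd hP (by simp)
      refine ih _ _ b ?_ h1 hb hT (fun k hk1 hk2 => hF k hk1 (by omega))
      have hm := PySem.Int.floordiv_eq_ediv_of_pos (a := low + high) (b := 2) (by omega)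
      omega
    · omega

-- the doubling loop's exit state: the probe still holds at start + i/2 (inside the range)
-- and the loop condition fails at start + i
theorem expLoop_spec (arr : List Int) (target : Int) (start : Int) (end_ : Int) (right : Bool) :
    ∀ (fuel : Nat) (i : Int), 1 ≤ i → (end_ - (start + i)).toNat < fuel →
    start + PySem.Int.floordiv i 2 < end_ →
    pvProbe arr target right (start + PySem.Int.floordiv i 2) = true →
    (1 ≤ pvExpLoop arr target start end_ right fuel i ∧
     start + PySem.Int.floordiv (pvExpLoop arr target start end_ right fuel i) 2 < end_ ∧
     pvProbe arr target right (start + PySem.Int.floordiv (pvExpLoop arr target start end_ right fuel i) 2) = true ∧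
     ¬(start + pvExpLoop arr target start end_ right fuel i < end_ ∧
       pvProbe arr target right (start + pvExpLoop arr target start end_ right fuel i) = true)) := by
  intro fuel
  induction fuel with
  | zero => intro i _ hf; omega
  | succ n ih =>
    intro i hi hf hl hp
    simp only [pvExpLoop]
    split_ifs with hg
    · have hfd : PySem.Int.floordiv (i * 2) 2 = i := by
        rw [PySem.Int.floordiv_eq_ediv_of_pos (by omega)]
        omega
      refine ih (i * 2) (by omega) (by omega) (by rw [hfd]; exact hg.1) (by rw [hfd]; exact hg.2)
    · exact ⟨hi, hl, hp, hg⟩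

-- on a range where the probe is monotone, a split point exists
theorem exists_boundary (P : Int → Bool) :
    ∀ (n : Nat) (s e : Int), (e - s).toNat = n → s ≤ e →
    (∀ j k, s ≤ j → j ≤ k → k < e → P k = true → P j = true) →
    ∃ b, s ≤ b ∧ b ≤ e ∧ (∀ k, s ≤ k → k < b → P k = true) ∧
         (∀ k, b ≤ k → k < e → P k = false) := by
  intro n
  induction n with
  | zero =>
    intro s e hn hse _
    exact ⟨s, le_refl s, hse, by omega, by omega⟩
  | succ n ih =>
    intro s e hn hse mono
    have hlt : s < e := by omega
    cases hP : P s with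
    | false =>
      refine ⟨s, le_refl s, hse, by omega, ?_⟩
      intro k hk1 hk2
      cases hPk : P k with
      | false => rfl
      | true => exact absurd (mono s k (le_refl s) hk1 hk2 hPk) (by simp [hP])
    | true =>
      obtain ⟨b, hb1, hb2, hbT, hbF⟩ :=
        ih (s + 1) e (by omega) (by omega)
          (fun j k hj hjk hk hPk => mono j k (by omega) hjk hk hPk)
      refine ⟨b, by omega, hb2, ?_, hbF⟩
      intro k hk1 hk2
      rcases eq_or_lt_of_le hk1 with h | h
      · rw [← h]; exact hP
      · exact hbT k (by omega) hk2

-- a Pairwise-sorted slice gives pointwise order on the range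
theorem sorted_getD (arr : List Int) (start end_ : Int) (h0 : 0 ≤ start)
    (hlen : end_ ≤ (arr.length : Int))
    (hsort : (PySem.List.slice arr (some start) (some end_)).Pairwise (· ≤ ·)) :
    ∀ j k : Int, start ≤ j → j ≤ k → k < end_ →
      PySem.List.pyGetD arr j 0 ≤ PySem.List.pyGetD arr k 0 := by
  intro j k hj hjk hk
  rcases eq_or_lt_of_le hjk with h | h
  · rw [h]
  · have hjr := PySem.List.pyGetD_eq_getElem (xs := arr) (i := j) (d := 0) (by omega) (by omega)
    have hkr := PySem.List.pyGetD_eq_getElem (xs := arr) (i := k) (d := 0) (by omega) (by omega)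
    rw [hjr, hkr]
    have hs : PySem.List.slice arr (some start) (some end_) =
        (arr.drop start.toNat).take (end_.toNat - start.toNat) := by
      have h1 : start = ((start.toNat : Nat) : Int) := by omega
      have h2 : end_ = ((end_.toNat : Nat) : Int) := by omega
      rw [h1, h2, PySem.List.slice_natCast]
      congr 2
    rw [hs] at hsort
    rw [List.pairwise_iff_getElem] at hsort
    have hlen2 : ((arr.drop start.toNat).take (end_.toNat - start.toNat)).length
        = end_.toNat - start.toNat := by
      simp
      omega
    have := hsort (j.toNat - start.toNat) (k.toNat - start.toNat)
      (by omega) (by omega) (by omega)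
    simpa [List.getElem_take, List.getElem_drop,
      show start.toNat + (j.toNat - start.toNat) = j.toNat by omega,
      show start.toNat + (k.toNat - start.toNat) = k.toNat by omega] using this

theorem probe_mono (arr : List Int) (target : Int) (right : Bool) (start end_ : Int)
    (h0 : 0 ≤ start) (hlen : end_ ≤ (arr.length : Int))
    (hsort : (PySem.List.slice arr (some start) (some end_)).Pairwise (· ≤ ·)) :
    ∀ j k, start ≤ j → j ≤ k → k < end_ →
      pvProbe arr target right k = true → pvProbe arr target right j = true := by
  intro j k hj hjk hk hPk
  have hv := sorted_getD arr start end_ h0 hlen hsort j k hj hjk hk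
  unfold pvProbe at *
  cases right <;> simp_all <;> omega

-- ===== VERDICT (by name: the statement is the Claim_ definition above) =====
theorem exp_search_fw_spec : Claim_equal_exp_search_fw := by
  intro arr target start end_ right hdom hpre
  unfold Spec_exp_search_fw exp_search_fw exp_search_fw_alt
  obtain ⟨hs0, hslen, himpl⟩ := hpre
  have hiff : (if right = true then PySem.List.pyGetD arr start 0 > target
      else PySem.List.pyGetD arr start 0 ≥ target) ↔
      pvProbe arr target right start = false := by
    cases right <;> simp [pvProbe] <;> omega
  have hf12 : PySem.Int.floordiv 1 2 = 0 := by decide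
  by_cases hse : start < end_
  · rcases himpl hse with hg | ⟨hs0', hend, hsort⟩
    · rw [if_pos hg, if_pos hg]
    have mono := probe_mono arr target right start end_ hs0' hend hsort
    obtain ⟨b, hb1, hb2, hbT, hbF⟩ :=
      exists_boundary (pvProbe arr target right) (end_ - start).toNat start end_ rfl
        (by omega) mono
    have hB : pvBisect arr target right (end_ - start).toNat start end_ = b :=
      bisect_char arr target right (end_ - start).toNat start end_ b (le_refl _) hb1 hb2 hbT hbF
    by_cases hPs : pvProbe arr target right start = false
    · rw [if_pos (hiff.mpr hPs), if_pos (hiff.mpr hPs)]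
    · rw [if_neg (fun hC => hPs (hiff.mp hC)), if_neg (fun hC => hPs (hiff.mp hC)), hB]
      have hPs' : pvProbe arr target right start = true := by
        simpa [Bool.not_eq_false] using hPs
      obtain ⟨hf1, hfl, hfp, hexit⟩ :=
        expLoop_spec arr target start end_ right ((end_ - (start + 1)).toNat + 1) 1
          (le_refl 1) (by omega) (by rw [hf12]; omega) (by rw [hf12]; simpa using hPs')
      set f := pvExpLoop arr target start end_ right ((end_ - (start + 1)).toNat + 1) 1 with hf
      have hfd0 : 0 ≤ PySem.Int.floordiv f 2 := by
        rw [PySem.Int.floordiv_eq_ediv_of_pos (by omega)]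
        omega
      have hlow : start + PySem.Int.floordiv f 2 < b := by
        by_contra hc
        push Not at hc
        have h2 := hbF (start + PySem.Int.floordiv f 2) (by omega) hfl
        rw [hfp] at h2
        exact absurd h2 (by simp)
      have hhigh : b ≤ start + f := by
        by_cases hlt : start + f < end_
        · cases hPf : pvProbe arr target right (start + f) with
          | true => exact absurd ⟨hlt, hPf⟩ hexit
          | false =>
            by_contra hc
            push Not at hc
            have h2 := hbT (start + f) (by omega) (by omega)
            rw [h2] at hPf
            exact absurd hPf (by simp)
        · omega
      exact binA_char arr target right _ _ _ b (le_refl _) (by omega)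
        (le_min hhigh hb2)
        (fun k hk1 hk2 => hbT k (by omega) hk2)
        (fun k hk1 hk2 => hbF k hk1 (by omega))
  · have hB : pvBisect arr target right (end_ - start).toNat start end_ = start := by
      have h0 : (end_ - start).toNat = 0 := by omega
      rw [h0]
      simp only [pvBisect]
    have hE : pvExpLoop arr target start end_ right ((end_ - (start + 1)).toNat + 1) 1 = 1 := by
      simp only [pvExpLoop]
      rw [if_neg (by rintro ⟨hc, -⟩; omega)]
    by_cases hPs : pvProbe arr target right start = false
    · rw [if_pos (hiff.mpr hPs), if_pos (hiff.mpr hPs)]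
    · rw [if_neg (fun hC => hPs (hiff.mp hC)), if_neg (fun hC => hPs (hiff.mp hC))]
      show pvBinLoopA arr target right _
          (start + PySem.Int.floordiv (pvExpLoop arr target start end_ right ((end_ - (start + 1)).toNat + 1) 1) 2)
          (min (start + pvExpLoop arr target start end_ right ((end_ - (start + 1)).toNat + 1) 1) end_)
          = pvBisect arr target right (end_ - start).toNat start end_
      rw [hE, hB, hf12]
      have hmin : min (start + 1) end_ = end_ := by omega
      have hfuel : (min (start + 1) end_ - (start + 0)).toNat = 0 := by omega
      rw [hfuel, hmin]
      simp only [pvBinLoopA]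
      omega
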